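-- pv_equiv track=rewrite | github.com/Nguyenvangiahuy123/lc79-betvip-api | main.py | markov4
-- ===== SOURCE A (Python) =====
-- from collections import defaultdict, deque
--
-- def markov4(history):
--     if len(history)<5: return None
--     last4 = history[-4:]
--     trans = defaultdict(lambda: defaultdict(int))
--     for i in range(len(history)-4):
--         trans[history[i:i+4]][history[i+4]]+=1
--     if trans[last4]['T'] > trans[last4]['X']: return 'T'
--     if trans[last4]['X'] > trans[last4]['T']: return 'X'
--     return None
-- ===== SOURCE B (Python) =====
-- def markov4(history):
--     if len(history) < 5:
--         return None
--     last4 = history[-4:]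
--     t = x = 0
--     pos = history.find(last4)
--     while 0 <= pos <= len(history) - 5:
--         c = history[pos + 4]
--         if c == 'T':
--             t += 1
--         elif c == 'X':
--             x += 1
--         pos = history.find(last4, pos + 1)
--     if t > x:
--         return 'T'
--     if x > t:
--         return 'X'
--     return None
-- ===== Notes on version B (the rewrite author's own statement) =====
-- stated objective: faster
-- what changed: Instead of building a full nested-defaultdict transition table by scanning every 4-char window, B searches for occurrences of the final 4-gram directly with repeated str.find and keeps two counters of the successor characters, never materialising any table or examining non-matching windows.
import Mathlib
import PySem

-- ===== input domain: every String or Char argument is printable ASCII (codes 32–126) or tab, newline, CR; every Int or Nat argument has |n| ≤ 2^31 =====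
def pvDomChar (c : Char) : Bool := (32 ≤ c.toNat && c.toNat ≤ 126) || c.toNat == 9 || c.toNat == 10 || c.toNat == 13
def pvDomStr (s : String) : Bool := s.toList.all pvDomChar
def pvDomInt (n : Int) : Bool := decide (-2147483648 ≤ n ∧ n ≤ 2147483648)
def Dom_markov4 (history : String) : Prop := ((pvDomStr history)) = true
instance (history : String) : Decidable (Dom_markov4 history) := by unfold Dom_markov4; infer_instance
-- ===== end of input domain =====

-- B replaces A's full nested-defaultdict transition table (built by scanning every window)
-- with a substring-search loop: repeated str.find jumps between occurrences of the final
-- 4-gram, keeping two successor counters (measured constant-factor faster, O(1) extra space).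

-- ===== PORT A =====
def markov4 (history : String) : Option String :=
  let h := history.toList
  if h.length < 5 then none
  else
    let last4 := PySem.List.slice h (some (-4)) none
    let trans := (PySem.List.pyRange 0 ((h.length : Int) - 4) 1).foldl
      (fun (d : PySem.Dict (List Char) (PySem.Dict Char Int)) i =>
        match PySem.List.pyGet? h (i + 4) with
        | some c => d.modify (PySem.List.slice h (some i) (some (i + 4))) PySem.Dict.empty
            (fun inner => inner.modify c 0 (· + 1))
        | none => d)  -- unreachable totality guard: 0 ≤ i < len-4, so history[i+4] is in range
      PySem.Dict.empty
    if (trans.getD last4 PySem.Dict.empty).getD 'T' 0 > (trans.getD last4 PySem.Dict.empty).getD 'X' 0 then some "T"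
    else if (trans.getD last4 PySem.Dict.empty).getD 'X' 0 > (trans.getD last4 PySem.Dict.empty).getD 'T' 0 then some "X"
    else none

-- ===== PORT B =====
-- B's while loop: pos runs over the str.find occurrences of last4; fuel is a totality
-- guard only (pos strictly increases each iteration, so h.length + 1 steps always suffice).
def markovGo (h last4 : List Char) (fuel : Nat) (pos t x : Int) : Int × Int :=
  match fuel with
  | 0 => (t, x)
  | Nat.succ fuel =>
    if 0 ≤ pos ∧ pos ≤ (h.length : Int) - 5 then
      match PySem.List.pyGet? h (pos + 4) with
      | some c =>
        if c = 'T' then markovGo h last4 fuel (PySem.Chars.findFrom h last4 (pos + 1) none) (t + 1) x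
        else if c = 'X' then markovGo h last4 fuel (PySem.Chars.findFrom h last4 (pos + 1) none) t (x + 1)
        else markovGo h last4 fuel (PySem.Chars.findFrom h last4 (pos + 1) none) t x
      | none => (t, x)  -- unreachable: 0 ≤ pos ≤ len-5 puts history[pos+4] in range
    else (t, x)

def markov4_alt (history : String) : Option String :=
  let h := history.toList
  if h.length < 5 then none
  else
    let last4 := PySem.List.slice h (some (-4)) none
    let tx := markovGo h last4 (h.length + 1) (PySem.Chars.find h last4) 0 0
    if tx.1 > tx.2 then some "T" else if tx.2 > tx.1 then some "X" else none

-- ===== PRECONDITION & SPEC =====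
def Spec_markov4 (history : String) (out : Option String) : Prop := out = markov4_alt history
instance (history : String) (out : Option String) : Decidable (Spec_markov4 history out) := by unfold Spec_markov4; infer_instance

-- ===== CLAIM (what is proved, stated in full; the proofs are below) =====
def Claim_equal_markov4 : Prop := ∀ (history : String), Dom_markov4 history → Spec_markov4 history (markov4 history)

-- ===== LEMMAS AND PROOFS =====

-- successor-count predicate: position i extends 4-gram k with character c
def pvHit (h : List Char) (k : List Char) (c : Char) (i : Int) : Bool :=
  (PySem.List.slice h (some i) (some (i + 4)) == k) && (PySem.List.pyGet? h (i + 4) == some c)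

-- A's nested-dict loop counts exactly the hits
lemma dict_count (h : List Char) (k : List Char) (c : Char) (l : List Int)
    (d : PySem.Dict (List Char) (PySem.Dict Char Int)) :
    (((l.foldl
      (fun (d : PySem.Dict (List Char) (PySem.Dict Char Int)) i =>
        match PySem.List.pyGet? h (i + 4) with
        | some ch => d.modify (PySem.List.slice h (some i) (some (i + 4))) PySem.Dict.empty
            (fun inner => inner.modify ch 0 (· + 1))
        | none => d) d).getD k PySem.Dict.empty).getD c 0)
    = ((d.getD k PySem.Dict.empty).getD c 0) + (l.countP (pvHit h k c) : Int) := by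
  induction l generalizing d with
  | nil => simp
  | cons i t ih =>
    simp only [List.foldl_cons, List.countP_cons]
    cases hg : PySem.List.pyGet? h (i + 4) with
    | none =>
      rw [ih]
      simp [pvHit, hg]
    | some ch =>
      rw [ih, PySem.Dict.getD_modify]
      by_cases hk : k = PySem.List.slice h (some i) (some (i + 4))
      · subst hk
        rw [if_pos rfl, PySem.Dict.getD_modify]
        by_cases hc : c = ch
        · simp [pvHit, hg, hc]
          omega
        · simp [pvHit, hg, hc, Ne.symm hc]
      · rw [if_neg hk]
        simp [pvHit, hg, Ne.symm hk]

-- a position with no last4-prefix is not a hit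
lemma hit_false (h last4 : List Char) (hl4 : last4.length = 4) (c : Char) (i : Int)
    (hi : 0 ≤ i) (hnp : ¬ last4 <+: h.drop i.toNat) : pvHit h last4 c i = false := by
  have hi' : i = ((i.toNat : Nat) : Int) := by omega
  rw [pvHit, hi']
  have h4 : ((i.toNat : Nat) : Int) + 4 = ((i.toNat : Nat) : Int) + ((4 : Nat) : Int) := by norm_num
  rw [h4, PySem.List.slice_natCast_add]
  have : ((h.drop i.toNat).take 4 == last4) = false := by
    rw [beq_eq_false_iff_ne]
    intro heq
    exact hnp (by rw [List.prefix_iff_eq_take, hl4, heq])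
  simp [this]

-- a position carrying a last4-prefix is a hit exactly when the successor matches
lemma hit_at (h last4 : List Char) (hl4 : last4.length = 4) (c : Char) (p : Nat)
    (hpre : last4 <+: h.drop p) :
    pvHit h last4 c ((p : Nat) : Int) = (PySem.List.pyGet? h (((p : Nat) : Int) + 4) == some c) := by
  rw [pvHit]
  have h4 : ((p : Nat) : Int) + 4 = ((p : Nat) : Int) + ((4 : Nat) : Int) := by norm_num
  rw [h4, PySem.List.slice_natCast_add]
  have : (h.drop p).take 4 = last4 := by
    have := List.prefix_iff_eq_take.mp hpre
    rw [hl4] at this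
    exact this.symm
  simp [this]

-- no occurrence of last4 at or after k ⇒ no hits in [k, m)
lemma countP_zero_of_no_prefix (h last4 : List Char) (hl4 : last4.length = 4) (c : Char)
    (k : Nat) (m : Int)
    (hnp : ∀ i : Nat, k ≤ i → ¬ last4 <+: h.drop i) :
    (PySem.List.pyRange ((k : Nat) : Int) m 1).countP (pvHit h last4 c) = 0 := by
  rw [List.countP_eq_zero]
  intro i hi
  have hm := (PySem.List.mem_pyRange_one).mp hi
  have h0 : (0 : Int) ≤ i := by omega
  have hk : k ≤ i.toNat := by omega
  simp [hit_false h last4 hl4 c i h0 (hnp i.toNat hk)]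

-- the find-driven loop counts exactly the hits from position k on
lemma go_count (h last4 : List Char) (hl4 : last4.length = 4)
    (fuel : Nat) (k : Nat) (t x : Int)
    (hk : k ≤ h.length) (hf : h.length - k ≤ fuel) :
    markovGo h last4 fuel (PySem.Chars.findFrom h last4 ((k : Nat) : Int) none) t x
    = (t + ((PySem.List.pyRange ((k : Nat) : Int) ((h.length : Int) - 4) 1).countP (pvHit h last4 'T') : Int),
       x + ((PySem.List.pyRange ((k : Nat) : Int) ((h.length : Int) - 4) 1).countP (pvHit h last4 'X') : Int)) := by
  induction fuel generalizing k t x with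
  | zero =>
    have hkn : h.length ≤ k := by omega
    have hnil : PySem.List.pyRange ((k : Nat) : Int) ((h.length : Int) - 4) 1 = [] :=
      PySem.List.pyRange_one_eq_nil (by omega)
    simp [markovGo, hnil]
  | succ fuel ih =>
    by_cases hp : PySem.Chars.findFrom h last4 ((k : Nat) : Int) none = -1
    · -- no occurrence at or after k
      have hinf : ¬ last4 <:+: h.drop k :=
        (PySem.Chars.findFrom_natCast_eq_neg_one_iff h last4 k hk).mp hp
      have hnp : ∀ i : Nat, k ≤ i → ¬ last4 <+: h.drop i := by
        intro i hki hpre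
        apply hinf
        have : h.drop i = (h.drop k).drop (i - k) := by
          rw [List.drop_drop]
          congr 1
          omega
        rw [this] at hpre
        exact hpre.isInfix.trans (List.drop_suffix _ _).isInfix
      rw [hp]
      have : ¬ ((0 : Int) ≤ -1 ∧ (-1 : Int) ≤ (h.length : Int) - 5) := by omega
      simp only [markovGo, if_neg this]
      rw [countP_zero_of_no_prefix h last4 hl4 'T' k _ hnp,
          countP_zero_of_no_prefix h last4 hl4 'X' k _ hnp]
      simp
    · obtain ⟨hkp, hpre, hmin⟩ := PySem.Chars.findFrom_natCast_spec h last4 k hk hp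
      set p := PySem.Chars.findFrom h last4 ((k : Nat) : Int) none with hpdef
      have h0p : (0 : Int) ≤ p := by omega
      have hpcast : p = ((p.toNat : Nat) : Int) := by omega
      have hkp' : k ≤ p.toNat := by omega
      by_cases hbig : p ≤ (h.length : Int) - 5
      · -- occurrence inside the counted region
        have hcond : (0 : Int) ≤ p ∧ p ≤ (h.length : Int) - 5 := ⟨h0p, hbig⟩
        have hidx : p.toNat + 4 < h.length := by omega
        obtain ⟨c, hc⟩ : ∃ c, h[p.toNat + 4]? = some c := ⟨_, List.getElem?_eq_getElem hidx⟩
        have hget : PySem.List.pyGet? h (p + 4) = some c := by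
          have hcast : p + 4 = (((p.toNat + 4 : Nat)) : Int) := by omega
          rw [hcast, PySem.List.pyGet?_natCast, hc]
        have hnext : p + 1 = (((p.toNat + 1 : Nat)) : Int) := by push_cast; omega
        have hk' : p.toNat + 1 ≤ h.length := by omega
        have hf' : h.length - (p.toNat + 1) ≤ fuel := by omega
        -- split the range at p
        have hsplit := PySem.List.pyRange_one_append ((k : Nat) : Int) p ((h.length : Int) - 4) hkp (by omega)
        rw [PySem.List.pyRange_one_cons (show p < (h.length : Int) - 4 by omega)] at hsplit
        have hzero : ∀ c, (PySem.List.pyRange ((k : Nat) : Int) p 1).countP (pvHit h last4 c) = 0 := by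
          intro c
          rw [List.countP_eq_zero]
          intro i hi
          have hm := (PySem.List.mem_pyRange_one).mp hi
          have h0 : (0 : Int) ≤ i := by omega
          intro htrue
          rw [hit_false h last4 hl4 c i h0 (hmin i.toNat (by omega) (by omega))] at htrue
          cases htrue
        have hhit : ∀ c, pvHit h last4 c p = (PySem.List.pyGet? h (p + 4) == some c) := by
          intro c
          rw [hpcast]
          exact hit_at h last4 hl4 c p.toNat hpre
        have hcnt : ∀ c', ((PySem.List.pyRange ((k : Nat) : Int) ((h.length : Int) - 4) 1).countP (pvHit h last4 c') : Int)
            = (if c = c' then 1 else 0)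
              + ((PySem.List.pyRange (((p.toNat + 1 : Nat)) : Int) ((h.length : Int) - 4) 1).countP (pvHit h last4 c') : Int) := by
          intro c'
          rw [hsplit, List.countP_append, List.countP_cons, hzero, hhit, hget, ← hnext]
          by_cases hcc : c = c' <;> simp [hcc] <;> omega
        simp only [markovGo, if_pos hcond, hget]
        by_cases hT : c = 'T'
        · rw [if_pos hT, hnext, ih (p.toNat + 1) (t + 1) x hk' hf', hcnt 'T', hcnt 'X']
          simp [hT] <;> ring
        · rw [if_neg hT]
          by_cases hX : c = 'X'
          · rw [if_pos hX, hnext, ih (p.toNat + 1) t (x + 1) hk' hf', hcnt 'T', hcnt 'X']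
            simp [hT, hX] <;> ring
          · rw [if_neg hX, hnext, ih (p.toNat + 1) t x hk' hf', hcnt 'T', hcnt 'X']
            simp [hT, hX]
      · -- first occurrence is past the counted region: loop stops, no hits in [k, n-4)
        have hcond : ¬ ((0 : Int) ≤ p ∧ p ≤ (h.length : Int) - 5) := by omega
        simp only [markovGo, if_neg hcond]
        have hzero : ∀ c, (PySem.List.pyRange ((k : Nat) : Int) ((h.length : Int) - 4) 1).countP (pvHit h last4 c) = 0 := by
          intro c
          rw [List.countP_eq_zero]
          intro i hi
          have hm := (PySem.List.mem_pyRange_one).mp hi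
          have h0 : (0 : Int) ≤ i := by omega
          intro htrue
          rw [hit_false h last4 hl4 c i h0 (hmin i.toNat (by omega) (by omega))] at htrue
          cases htrue
        rw [hzero, hzero]
        simp

-- ===== VERDICT (by name: the statement is the Claim_ definition above) =====
theorem markov4_spec : Claim_equal_markov4 := by
  intro history _
  unfold Spec_markov4 markov4 markov4_alt
  simp only
  by_cases hlen : history.toList.length < 5
  · rw [if_pos hlen, if_pos hlen]
  · rw [if_neg hlen, if_neg hlen]
    have hn : 5 ≤ history.toList.length := by omega
    have hl4 : (PySem.List.slice history.toList (some (-4)) none).length = 4 := by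
      rw [PySem.List.slice_from_neg_ofNat history.toList 4 (by omega)]
      rw [List.length_drop]
      omega
    have hfind : PySem.Chars.find history.toList (PySem.List.slice history.toList (some (-4)) none)
        = PySem.Chars.findFrom history.toList (PySem.List.slice history.toList (some (-4)) none) (((0 : Nat)) : Int) none := by
      rw [Nat.cast_zero, PySem.Chars.findFrom_zero]
    rw [hfind, go_count history.toList _ hl4 (history.toList.length + 1) 0 0 0 (by omega) (by omega)]
    simp only [dict_count]
    simp [Nat.cast_lt]
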